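-- pv_equiv track=rewrite | github.com/siegelzero/rosemary | algebra/polynomials.py | list_sub
-- ===== SOURCE A (Python) =====
-- def list_sub(A, B):
--     """
--     Subtract two lists.
--
--     Let A be a list of length m, and let B be a list of length n. This returns
--     the list [A[i] - B[i] | 0 <= i <= max(m, n)], where A[i], B[i] = 0 if i >=
--     m, n, respectively. In effect, this works the same as polynomial addition,
--     where we assume that coefficients not appearing in a polynomial are zero.
--
--     Input:
--         * A - A list of numbers.
--         * B - A list of numbers.
--
--     Output:
--         * C - A list of numbers.
--
--     Examples:
--         >>> list_sub([0, 1, 2], [1, -1, 1])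
--         [-1, 2, 1]
--         >>> list_sub([1, 1, 1, 1], [2, 3, 5])
--         [-1, -2, -4, 1]
--     """
--
--     if len(A) >= len(B):
--         C = list(A)
--         for (i, c) in enumerate(B):
--             C[i] -= c
--     else:
--         C = [-e for e in B]
--         for (i, c) in enumerate(A):
--             C[i] += c
--     return C
-- ===== SOURCE B (Python) =====
-- def list_sub(A, B):
--     m = min(len(A), len(B))
--     return [A[i] - B[i] for i in range(m)] + A[m:] + [-e for e in B[m:]]
-- ===== Notes on version B (the rewrite author's own statement) =====
-- stated objective: simpler
-- what changed: Replaces A's length branch with copy-then-in-place index mutation by one branch-free construction: a min-length prefix comprehension of differences concatenated with the untouched tail of A and the negated tail of B (one tail is always empty).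
import Mathlib
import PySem

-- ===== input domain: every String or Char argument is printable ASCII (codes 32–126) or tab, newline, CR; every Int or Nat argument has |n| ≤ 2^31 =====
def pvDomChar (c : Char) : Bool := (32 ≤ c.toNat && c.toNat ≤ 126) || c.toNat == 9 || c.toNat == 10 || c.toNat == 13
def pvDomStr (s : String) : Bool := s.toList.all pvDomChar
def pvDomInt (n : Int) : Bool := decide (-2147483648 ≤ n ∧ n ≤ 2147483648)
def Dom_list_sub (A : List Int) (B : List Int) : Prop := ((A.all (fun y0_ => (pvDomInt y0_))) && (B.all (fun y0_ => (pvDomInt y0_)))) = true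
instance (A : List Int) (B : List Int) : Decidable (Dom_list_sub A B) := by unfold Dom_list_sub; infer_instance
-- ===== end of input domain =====

-- B replaces A's length branch and copy-plus-in-place mutation with one branch-free
-- construction: min-prefix differences ++ A's tail ++ negated tail of B (objective: simpler).

-- B replaces A's length branch and copy-plus-in-place mutation with one branch-free
-- construction: min-prefix differences ++ A's tail ++ negated tail of B (objective: simpler).

-- ===== PORT A =====
def list_sub (A : List Int) (B : List Int) : List Int :=
  if A.length ≥ B.length then
    (PySem.List.enumerate B 0).foldl
      (fun C ic => PySem.List.pySetD C ic.1 (PySem.List.pyGetD C ic.1 0 - ic.2)) A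
  else
    (PySem.List.enumerate A 0).foldl
      (fun C ic => PySem.List.pySetD C ic.1 (PySem.List.pyGetD C ic.1 0 + ic.2))
      (B.map (fun e => -e))

-- ===== PORT B =====
def list_sub_alt (A : List Int) (B : List Int) : List Int :=
  ((List.range (min A.length B.length)).map
      (fun (i : Nat) => PySem.List.pyGetD A (i : Int) 0 - PySem.List.pyGetD B (i : Int) 0))
    ++ A.drop (min A.length B.length)
    ++ (B.drop (min A.length B.length)).map (fun e => -e)

-- ===== PRECONDITION & SPEC =====
def Spec_list_sub (A : List Int) (B : List Int) (out : List Int) : Prop := out = list_sub_alt A B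
instance (A : List Int) (B : List Int) (out : List Int) : Decidable (Spec_list_sub A B out) := by unfold Spec_list_sub; infer_instance

-- ===== CLAIM (what is proved, stated in full; the proofs are below) =====
def Claim_equal_list_sub : Prop := ∀ (A : List Int) (B : List Int), Dom_list_sub A B → Spec_list_sub A B (list_sub A B)

-- ===== LEMMAS AND PROOFS =====

-- A's loop starting at index s+1 leaves the head of an accumulator alone.
theorem loop_shift (g : Int → Int → Int) (bs : List Int) :
    ∀ (s : Nat) (y : Int) (C : List Int),
    (PySem.List.enumerate bs ((s : Int) + 1)).foldl
      (fun C ic => PySem.List.pySetD C ic.1 (g (PySem.List.pyGetD C ic.1 0) ic.2)) (y :: C)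
    = y :: (PySem.List.enumerate bs (s : Int)).foldl
      (fun C ic => PySem.List.pySetD C ic.1 (g (PySem.List.pyGetD C ic.1 0) ic.2)) C := by
  induction bs with
  | nil => intro s y C; simp [PySem.List.enumerate_nil]
  | cons c rest ih =>
    intro s y C
    rw [PySem.List.enumerate_cons, PySem.List.enumerate_cons]
    simp only [List.foldl_cons]
    rw [show ((s : Int) + 1) = ((s + 1 : Nat) : Int) by push_cast; ring]
    simp only [PySem.List.pyGetD_natCast, PySem.List.pySetD_natCast]
    rw [List.getD_cons_succ, List.set_cons_succ]
    exact ih (s + 1) y (C.set s (g (C.getD s 0) c))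

-- A's loop from index 0 computes the zipWith over the prefix and leaves the tail.
theorem loop_eq (g : Int → Int → Int) :
    ∀ (bs C : List Int), bs.length ≤ C.length →
    (PySem.List.enumerate bs (0 : Int)).foldl
      (fun C ic => PySem.List.pySetD C ic.1 (g (PySem.List.pyGetD C ic.1 0) ic.2)) C
    = List.zipWith g C bs ++ C.drop bs.length := by
  intro bs
  induction bs with
  | nil => intro C h; simp [PySem.List.enumerate_nil]
  | cons c rest ih =>
    intro C h
    cases C with
    | nil => simp at h
    | cons x C' =>
      rw [PySem.List.enumerate_cons]
      simp only [List.foldl_cons]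
      have h0 : PySem.List.pySetD (x :: C') (0 : Int)
          (g (PySem.List.pyGetD (x :: C') (0 : Int) 0) c) = g x c :: C' := by
        rw [show (0 : Int) = ((0 : Nat) : Int) from rfl]
        simp only [PySem.List.pySetD_natCast, PySem.List.pyGetD_natCast]
        rfl
      rw [h0]
      have hsh := loop_shift g rest 0 (g x c) C'
      simp only [Nat.cast_zero] at hsh
      rw [hsh, ih C' (by simpa using Nat.le_of_succ_le_succ h)]
      simp [List.zipWith]

-- The prefix comprehension of B's port is a zipWith.
theorem range_map_eq_zipWith :
    ∀ (A B : List Int),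
    (List.range (min A.length B.length)).map
      (fun (i : Nat) => PySem.List.pyGetD A (i : Int) 0 - PySem.List.pyGetD B (i : Int) 0)
    = List.zipWith (fun a b => a - b) A B := by
  intro A
  induction A with
  | nil => intro B; simp
  | cons a A' ih =>
    intro B
    cases B with
    | nil => simp
    | cons b B' =>
      have hmin : min (a :: A').length (b :: B').length
          = min A'.length B'.length + 1 := by simp
      rw [hmin, List.range_succ_eq_map, List.map_cons, List.map_map,
        List.zipWith_cons_cons]
      congr 1
      · simp [PySem.List.pyGetD_zero_cons]
      · rw [← ih B']
        apply List.map_congr_left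
        intro i _
        simp only [Function.comp_apply, PySem.List.pyGetD_natCast,
          List.getD_cons_succ]

-- zipWith add over a negated left list is zipWith sub flipped.
theorem zipWith_negmap :
    ∀ (A B : List Int),
    List.zipWith (fun c a => c + a) (B.map (fun e => -e)) A
    = List.zipWith (fun a b => a - b) A B := by
  intro A
  induction A with
  | nil => intro B; simp
  | cons a A' ih =>
    intro B
    cases B with
    | nil => simp
    | cons b B' => simp [ih B']; ring

-- ===== VERDICT (by name: the statement is the Claim_ definition above) =====
theorem list_sub_spec : Claim_equal_list_sub := by
  intro A B _
  unfold Spec_list_sub list_sub list_sub_alt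
  rw [range_map_eq_zipWith]
  by_cases h : A.length ≥ B.length
  · rw [if_pos h, loop_eq _ B A h]
    have hm : min A.length B.length = B.length := Nat.min_eq_right h
    rw [hm]
    simp [List.drop_length]
  · rw [if_neg h]
    have hlt : A.length < B.length := Nat.lt_of_not_le h
    have hle : A.length ≤ (B.map (fun e => -e)).length := by
      simpa using Nat.le_of_lt hlt
    rw [loop_eq _ A _ hle, zipWith_negmap]
    have hm : min A.length B.length = A.length := Nat.min_eq_left (Nat.le_of_lt hlt)
    rw [hm, List.map_drop, List.drop_length]
    simp
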